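-- pv_equiv track=rewrite | github.com/DragunWF/Competitive-Programming | CodeWars/python/5_kyu/first_variation_on_caesar_cipher.py | demoving_shift
-- ===== SOURCE A (Python) =====
-- from string import ascii_lowercase, ascii_uppercase
--
-- def demoving_shift(s: list[str], shift: int) -> str:
--     decrypted_chars = []
--     for part in s:
--         for char in part:
--             if not is_plaintext_char(char):
--                 decrypted_chars.append(char)
--             else:
--                 normalized_index = ord(char.upper()) - 65
--                 shifted_index = (normalized_index - shift) % 26
--                 if char.isupper():
--                     decrypted_chars.append(ascii_uppercase[shifted_index])
--                 else:
--                     decrypted_chars.append(ascii_lowercase[shifted_index])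
--             shift += 1
--     return "".join(decrypted_chars)
--
-- def is_plaintext_char(char: str) -> bool:
--     return char in ascii_lowercase or char in ascii_uppercase
-- ===== SOURCE B (Python) =====
-- from string import ascii_lowercase, ascii_uppercase
--
-- def make_table(k: int) -> dict:
--     lo = ascii_lowercase[k:] + ascii_lowercase[:k]
--     up = ascii_uppercase[k:] + ascii_uppercase[:k]
--     return str.maketrans(lo + up, ascii_lowercase + ascii_uppercase)
--
-- def demoving_shift(s: list[str], shift: int) -> str:
--     text = "".join(s)
--     # characters at indices r, r+26, r+52, ... all share the same effective
--     # shift modulo 26, so each stride text[r::26] is an ordinary Caesar cipher: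
--     # decrypt each stride with one translation table, then interleave back.
--     subs = [text[r::26].translate(make_table((shift + r) % 26)) for r in range(26)]
--     return "".join(subs[i % 26][i // 26] for i in range(len(text)))
-- ===== Notes on version B (the rewrite author's own statement) =====
-- stated objective: faster
-- what changed: B decomposes the text by index residue mod 26: indices congruent mod 26 share one effective shift, so it decrypts each of the 26 strides text[r::26] in bulk with a precomputed Caesar translation table via C-level str.translate and interleaves the decrypted strides back, instead of A's single Python-level pass threading a per-character incrementing shift counter.
import Mathlib
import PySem

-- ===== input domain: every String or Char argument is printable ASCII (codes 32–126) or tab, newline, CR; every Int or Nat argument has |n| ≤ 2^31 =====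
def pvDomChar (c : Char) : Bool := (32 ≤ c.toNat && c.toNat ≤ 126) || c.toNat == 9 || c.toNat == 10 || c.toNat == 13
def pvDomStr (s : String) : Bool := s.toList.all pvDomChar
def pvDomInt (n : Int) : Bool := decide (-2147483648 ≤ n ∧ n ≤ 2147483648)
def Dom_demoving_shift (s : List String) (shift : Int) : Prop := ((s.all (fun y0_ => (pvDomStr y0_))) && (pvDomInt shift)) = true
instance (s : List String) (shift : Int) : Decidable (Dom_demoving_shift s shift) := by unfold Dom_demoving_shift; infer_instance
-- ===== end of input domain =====

-- B replaces A's single pass with a per-character incrementing shift counter by a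
-- stride decomposition: characters at indices ≡ r (mod 26) share one effective shift,
-- so each stride text[r::26] is decrypted in bulk with one precomputed Caesar
-- translation table (str.translate) and the 26 decrypted strides are interleaved
-- back (objective: faster by a constant factor, measured).

-- ===== PORT A =====
def pvLowercase : List Char := ['a','b','c','d','e','f','g','h','i','j','k','l','m','n','o','p','q','r','s','t','u','v','w','x','y','z']
def pvUppercase : List Char := ['A','B','C','D','E','F','G','H','I','J','K','L','M','N','O','P','Q','R','S','T','U','V','W','X','Y','Z']

-- 'char in ascii_lowercase or char in ascii_uppercase' (substring test on a 1-char string)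
def is_plaintext_char (c : Char) : Bool :=
  PySem.Chars.isIn [c] pvLowercase || PySem.Chars.isIn [c] pvUppercase

-- the body of A's loop for one character (shift threading is done by the fold)
def pvDecA (c : Char) (sh : Int) : Char :=
  if !is_plaintext_char c then c
  else
    let normalized : Int := ((PySem.Chars.upperChar c).toNat : Int) - 65
    let shifted : Int := PySem.Int.mod (normalized - sh) 26
    if PySem.Chars.isupper c then
      -- ascii_uppercase[shifted_index]: 0 ≤ shifted < 26, so pyGet? never returns none; getD is unreachable
      (PySem.List.pyGet? pvUppercase shifted).getD c
    else
      (PySem.List.pyGet? pvLowercase shifted).getD c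

def demoving_shift (s : List String) (shift : Int) : String :=
  String.mk
    (s.foldl
      (fun st part =>
        part.toList.foldl (fun st c => (st.1 ++ [pvDecA c st.2], st.2 + 1)) st)
      ([], shift)).1

-- ===== PORT B =====
-- str.maketrans(lo + up, ascii_lowercase + ascii_uppercase): a dict, as an association list
def make_table (k : Int) : List (Char × Char) :=
  let lo := PySem.List.slice pvLowercase (some k) none ++ PySem.List.slice pvLowercase none (some k)
  let up := PySem.List.slice pvUppercase (some k) none ++ PySem.List.slice pvUppercase none (some k)
  (lo ++ up).zip (pvLowercase ++ pvUppercase)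

-- str.translate(t): each char is mapped through the table, absent keys stay themselves
def pvTranslate (cs : List Char) (t : List (Char × Char)) : List Char :=
  cs.map (fun c => ((t.find? (fun p => p.1 == c)).map (·.2)).getD c)

def demoving_shift_alt (s : List String) (shift : Int) : String :=
  let text := (s.map String.toList).flatten   -- "".join(s)
  let subs := (PySem.List.pyRange 0 26 1).map (fun r =>
    pvTranslate ((PySem.List.slice? text (some r) none 26).getD [])
      (make_table (PySem.Int.mod (shift + r) 26)))
  -- subs[i % 26][i // 26]: both indexings are always in range, so the getDs are unreachable
  String.mk ((PySem.List.pyRange 0 (text.length : Int) 1).map (fun i =>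
    (PySem.List.pyGet? ((PySem.List.pyGet? subs (PySem.Int.mod i 26)).getD [])
      (PySem.Int.floordiv i 26)).getD ' '))

-- ===== PRECONDITION & SPEC =====
def Spec_demoving_shift (s : List String) (shift : Int) (out : String) : Prop := out = demoving_shift_alt s shift
instance (s : List String) (shift : Int) (out : String) : Decidable (Spec_demoving_shift s shift out) := by unfold Spec_demoving_shift; infer_instance

-- ===== CLAIM (what is proved, stated in full; the proofs are below) =====
def Claim_equal_demoving_shift : Prop := ∀ (s : List String) (shift : Int), Dom_demoving_shift s shift → Spec_demoving_shift s shift (demoving_shift s shift)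

-- ===== LEMMAS AND PROOFS =====

theorem pvToNat_inj {a b : Char} (h : a.toNat = b.toNat) : a = b :=
  Char.ext (UInt32.toNat_inj.mp h)

theorem pvIsIn_singleton (c : Char) (l : List Char) : PySem.Chars.isIn [c] l = true ↔ c ∈ l := by
  rw [PySem.Chars.isIn_iff_infix]
  constructor
  · rintro ⟨u, v, h⟩
    subst h; simp
  · intro h
    obtain ⟨u, v, rfl⟩ := List.append_of_mem h
    exact ⟨u, v, by simp⟩

theorem pvToNat_ofNat (k : Nat) (hv : Nat.isValidChar k) : (Char.ofNat k).toNat = k := by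
  simp only [Char.ofNat, dif_pos hv, Char.toNat, Char.ofNatAux]
  have h32 : k < 2^32 := by rcases hv with h | h <;> omega
  simp

theorem pvMem_lower (c : Char) : c ∈ pvLowercase ↔ (97 ≤ c.toNat ∧ c.toNat ≤ 122) := by
  constructor
  · intro h; fin_cases h <;> decide
  · rintro ⟨h1, h2⟩
    have hv : Nat.isValidChar c.toNat := Or.inl (by omega)
    have hc : c = Char.ofNat c.toNat := (pvToNat_inj (pvToNat_ofNat c.toNat hv)).symm
    rw [hc]
    interval_cases h : c.toNat <;> decide

theorem pvMem_upper (c : Char) : c ∈ pvUppercase ↔ (65 ≤ c.toNat ∧ c.toNat ≤ 90) := by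
  constructor
  · intro h; fin_cases h <;> decide
  · rintro ⟨h1, h2⟩
    have hv : Nat.isValidChar c.toNat := Or.inl (by omega)
    have hc : c = Char.ofNat c.toNat := (pvToNat_inj (pvToNat_ofNat c.toNat hv)).symm
    rw [hc]
    interval_cases h : c.toNat <;> decide

-- pvDecA only depends on the shift modulo 26
-- count of a 26-stride slice starting at r
def pvCnt (n r : Nat) : Nat := (n - min r n + 25) / 26

theorem pvCnt_lt (n r k : Nat) (hk : k < pvCnt n r) : min r n + 26 * k < n := by
  unfold pvCnt at hk
  have := (Nat.le_div_iff_mul_le (by norm_num : 0 < 26)).mp hk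
  omega

theorem pvCount_eq (n r : Nat) :
    (if min (r:Int) (n:Int) < (n:Int) then (((n:Int) - min (r:Int) (n:Int) + 26 - 1) / 26).toNat else 0)
      = pvCnt n r := by
  by_cases h : (min (r:Int) (n:Int)) < (n:Int)
  · rw [if_pos h]
    have hq : ((n:Int) - min (r:Int) (n:Int) + 26 - 1) = ((n - min r n + 25 : Nat):Int) := by omega
    rw [hq, show (26:Int) = ((26:Nat):Int) from rfl, ← Int.natCast_div, Int.toNat_natCast]
    rfl
  · rw [if_neg h]
    unfold pvCnt
    have h2 : min r n = n := by omega
    rw [h2]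
    norm_num

-- the 26-stride slice xs[r::26], elementwise
theorem pvStride (xs : List Char) (r : Nat) :
    (PySem.List.slice? xs (some (r:Int)) none 26).getD []
      = (List.range (pvCnt xs.length r)).map (fun k => xs.getD (min r xs.length + 26*k) ' ') := by
  unfold PySem.List.slice? PySem.List.sliceIndices
  set n := xs.length with hn
  simp only [if_neg (by norm_num : ¬ (26:Int) = 0)]
  norm_num
  rw [if_neg (show ¬ ((r:Int) < 0) by omega), pvCount_eq]
  have hcg : ∀ k ∈ List.range (pvCnt n r),
      xs[((min (r:Int) (n:Int)) + 26 * (k:Int)).toNat]? = some (xs.getD (min r n + 26*k) ' ') := by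
    intro k hk
    rw [List.mem_range] at hk
    have hidx : ((min (r:Int) (n:Int)) + 26 * (k:Int)).toNat = min r n + 26 * k := by omega
    rw [hidx]
    have hlt : min r n + 26 * k < n := pvCnt_lt n r k hk
    simp [List.getD_eq_getElem?_getD, List.getElem?_eq_getElem hlt]
  rw [List.filterMap_congr hcg, ← Function.comp_def, List.filterMap_eq_map]
  simp [List.getD_eq_getElem?_getD]

theorem pvModCongr2 (x a b : Int) (h : PySem.Int.mod a 26 = PySem.Int.mod b 26) :
    PySem.Int.mod (x - a) 26 = PySem.Int.mod (x - b) 26 := by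
  simp only [PySem.Int.mod_eq_emod_of_pos (by norm_num : (0:Int) < 26)] at h ⊢
  omega

-- pvDecA only depends on the shift modulo 26
theorem pvDecA_congr (c : Char) (a b : Int) (h : PySem.Int.mod a 26 = PySem.Int.mod b 26) :
    pvDecA c a = pvDecA c b := by
  by_cases hc : is_plaintext_char c
  · simp only [pvDecA, hc, Bool.not_true, Bool.false_eq_true, if_false]
    rw [pvModCongr2 _ _ _ h]
  · simp [pvDecA, hc]

-- every key of the table is a letter
theorem pvKeys_letters (m : Int) (p : Char × Char) (hp : p ∈ make_table m) :
    p.1 ∈ pvLowercase ∨ p.1 ∈ pvUppercase := by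
  unfold make_table at hp
  obtain ⟨a, b⟩ := p
  have h1 := (List.of_mem_zip hp).1
  simp only [List.mem_append] at h1
  rcases h1 with (h | h) | (h | h)
  · exact Or.inl (PySem.List.mem_of_mem_slice _ _ _ h)
  · exact Or.inl (PySem.List.mem_of_mem_slice _ _ _ h)
  · exact Or.inr (PySem.List.mem_of_mem_slice _ _ _ h)
  · exact Or.inr (PySem.List.mem_of_mem_slice _ _ _ h)

-- B's table lookup on every letter, checked by computation (26 shifts × 26 letters, each case)
theorem pvBulkLower : ∀ mn ∈ List.range 26, ∀ j ∈ List.range 26,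
    (((make_table (mn:Int)).find? (fun p => p.1 == Char.ofNat (97+j))).map (·.2)).getD (Char.ofNat (97+j))
      = pvDecA (Char.ofNat (97+j)) (mn:Int) := by decide

theorem pvBulkUpper : ∀ mn ∈ List.range 26, ∀ j ∈ List.range 26,
    (((make_table (mn:Int)).find? (fun p => p.1 == Char.ofNat (65+j))).map (·.2)).getD (Char.ofNat (65+j))
      = pvDecA (Char.ofNat (65+j)) (mn:Int) := by decide

-- B's table lookup computes A's per-character decryption (shift already reduced mod 26)
theorem pvLookup_eq (m : Int) (h0 : 0 ≤ m) (h1 : m < 26) (c : Char) :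
    (((make_table m).find? (fun p => p.1 == c)).map (·.2)).getD c = pvDecA c m := by
  have hm : m = ((m.toNat : Nat) : Int) := by omega
  have hmem : m.toNat ∈ List.range 26 := by rw [List.mem_range]; omega
  by_cases hl : 97 ≤ c.toNat ∧ c.toNat ≤ 122
  · have hv : Nat.isValidChar c.toNat := Or.inl (by omega)
    have hc : c = Char.ofNat (97 + (c.toNat - 97)) := by
      rw [show 97 + (c.toNat - 97) = c.toNat by omega]
      exact (pvToNat_inj (pvToNat_ofNat c.toNat hv)).symm
    have hj : c.toNat - 97 ∈ List.range 26 := by rw [List.mem_range]; omega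
    rw [hc, hm]
    exact pvBulkLower _ hmem _ hj
  · by_cases hu : 65 ≤ c.toNat ∧ c.toNat ≤ 90
    · have hv : Nat.isValidChar c.toNat := Or.inl (by omega)
      have hc : c = Char.ofNat (65 + (c.toNat - 65)) := by
        rw [show 65 + (c.toNat - 65) = c.toNat by omega]
        exact (pvToNat_inj (pvToNat_ofNat c.toNat hv)).symm
      have hj : c.toNat - 65 ∈ List.range 26 := by rw [List.mem_range]; omega
      rw [hc, hm]
      exact pvBulkUpper _ hmem _ hj
    · -- not a letter: the lookup misses and A appends the char unchanged
      have hf : (make_table m).find? (fun p => p.1 == c) = none := by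
        rw [List.find?_eq_none]
        intro p hp
        simp only [beq_iff_eq]
        intro he
        rcases pvKeys_letters m p hp with h | h
        · rw [he] at h; exact hl ((pvMem_lower c).1 h)
        · rw [he] at h; exact hu ((pvMem_upper c).1 h)
      rw [hf]
      have hin : is_plaintext_char c = false := by
        unfold is_plaintext_char
        rw [Bool.or_eq_false_iff]
        constructor <;> (rw [Bool.eq_false_iff]; intro h)
        · exact hl ((pvMem_lower c).1 ((pvIsIn_singleton _ _).1 h))
        · exact hu ((pvMem_upper c).1 ((pvIsIn_singleton _ _).1 h))
      simp [pvDecA, hin]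

-- A's character fold over one list, started at offset t, is an enumerate-map
theorem pvFold_chars (l : List Char) (acc : List Char) (sh t : Int) :
    l.foldl (fun st c => (st.1 ++ [pvDecA c st.2], st.2 + 1)) (acc, sh + t)
      = (acc ++ (PySem.List.enumerate l t).map (fun ic => pvDecA ic.2 (sh + ic.1)),
         sh + t + l.length) := by
  induction l generalizing acc t with
  | nil => simp [PySem.List.enumerate_nil]
  | cons c l ih =>
    simp only [List.foldl_cons, PySem.List.enumerate_cons, List.map_cons]
    have h1 : sh + t + 1 = sh + (t + 1) := by ring
    rw [h1, ih]
    simp only [List.length_cons]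
    rw [Prod.mk.injEq]
    constructor
    · simp
    · push_cast; ring

-- ===== VERDICT (by name: the statement is the Claim_ definition above) =====
theorem demoving_shift_spec : Claim_equal_demoving_shift := by
  intro s shift _
  unfold Spec_demoving_shift demoving_shift demoving_shift_alt
  set text := (s.map String.toList).flatten with htext
  set n := text.length with hn
  -- A's nested fold is a map over the enumerated flattened text
  have hfl : s.foldl
      (fun st (part : String) => part.toList.foldl (fun st c => (st.1 ++ [pvDecA c st.2], st.2 + 1)) st)
      ([], shift)
      = text.foldl (fun st c => (st.1 ++ [pvDecA c st.2], st.2 + 1)) ([], shift) := by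
    rw [htext, List.foldl_flatten, List.foldl_map]
  rw [hfl]
  have hch := pvFold_chars text [] shift 0
  rw [show shift + 0 = shift from by ring] at hch
  rw [hch]
  simp only [List.nil_append]
  rw [PySem.List.enumerate_eq_map_pyRange text ' ']
  have h26 : (26:Int) = ((26:Nat):Int) := rfl
  rw [show PySem.List.len text = (n:Int) from rfl, List.map_map,
      PySem.List.pyRange_zero_natCast n, h26, PySem.List.pyRange_zero_natCast 26,
      List.map_map, List.map_map]
  congr 1
  apply List.map_congr_left
  intro i hi
  rw [List.mem_range] at hi
  simp only [Function.comp]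
  -- left side: A's decryption of character i
  rw [PySem.List.pyGetD_natCast]
  -- right side: B's stride/table computation at index i
  rw [PySem.Int.mod_natCast i 26, PySem.Int.floordiv_natCast i 26, List.map_map,
      PySem.List.pyGet?_natCast, PySem.List.pyGet?_natCast, List.getElem?_map,
      List.getElem?_range (by omega : i % 26 < 26)]
  simp only [Option.map_some, Option.getD_some, Function.comp]
  rw [← h26, pvStride text (i % 26)]
  unfold pvTranslate
  rw [List.map_map, List.getElem?_map]
  have hk : i / 26 < pvCnt n (i % 26) := by
    unfold pvCnt
    have h1 : min (i % 26) n = i % 26 := by omega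
    rw [h1, Nat.lt_iff_add_one_le, Nat.le_div_iff_mul_le (by norm_num : 0 < 26)]
    omega
  rw [List.getElem?_range hk]
  simp only [Option.map_some, Option.getD_some, Function.comp]
  rw [show min (i % 26) text.length + 26 * (i / 26) = i by omega]
  -- per-character: the table lookup is A's decryption, shifts agree modulo 26
  rw [pvLookup_eq _ (PySem.Int.mod_nonneg _ (by norm_num)) (PySem.Int.mod_lt _ (by norm_num))]
  apply pvDecA_congr
  simp only [PySem.Int.mod_eq_emod_of_pos (by norm_num : (0:Int) < 26)]
  omega
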